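-- pv_equiv track=rewrite | github.com/xiaoyan5686670/datepgv | backend/app/services/org_hierarchy.py | _remove_cycle_edges
-- ===== SOURCE A (Python) =====
-- from typing import Any
--
-- def _remove_cycle_edges(edges: list[dict[str, str]]) -> list[dict[str, str]]:
--     """
--     Iterative DFS that identifies back-edges (edges that close a cycle) and
--     removes them so the returned edge list forms a DAG.
--     """
--     adj: dict[str, list[str]] = {}
--     for e in edges:
--         adj.setdefault(e["from"], []).append(e["to"])
--
--     visited: set[str] = set()
--     in_stack: set[str] = set()
--     back_edges: set[tuple[str, str]] = set()
--
--     for start in list(adj.keys()):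
--         if start in visited:
--             continue
--         visited.add(start)
--         in_stack.add(start)
--         # Stack holds (node, iterator-over-children)
--         stack: list[tuple[str, Any]] = [(start, iter(adj.get(start, [])))]
--         while stack:
--             node, children = stack[-1]
--             try:
--                 child = next(children)
--                 if child in in_stack:
--                     back_edges.add((node, child))
--                 elif child not in visited:
--                     visited.add(child)
--                     in_stack.add(child)
--                     stack.append((child, iter(adj.get(child, []))))
--             except StopIteration:
--                 stack.pop()
--                 in_stack.discard(node)
--
--     return [e for e in edges if (e["from"], e["to"]) not in back_edges]
-- ===== SOURCE B (Python) =====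
-- def _remove_cycle_edges(edges: list[dict[str, str]]) -> list[dict[str, str]]:
--     """Recursive DFS: classify back-edges, then filter them out."""
--     adj: dict[str, list[str]] = {}
--     for e in edges:
--         adj.setdefault(e["from"], []).append(e["to"])
--
--     visited: set[str] = set()
--     in_stack: set[str] = set()
--     back_edges: set[tuple[str, str]] = set()
--
--     def visit(node: str) -> None:
--         visited.add(node)
--         in_stack.add(node)
--         for child in adj.get(node, []):
--             if child in in_stack:
--                 back_edges.add((node, child))
--             elif child not in visited:
--                 visit(child)
--         in_stack.discard(node)
--
--     for start in list(adj.keys()):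
--         if start not in visited:
--             visit(start)
--
--     return [e for e in edges if (e["from"], e["to"]) not in back_edges]
-- ===== Notes on version B (the rewrite author's own statement) =====
-- stated objective: alternative
-- what changed: The explicit stack machine with suspended child iterators is replaced by a recursive DFS visit function; same adjacency build and final filter.
import Mathlib
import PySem

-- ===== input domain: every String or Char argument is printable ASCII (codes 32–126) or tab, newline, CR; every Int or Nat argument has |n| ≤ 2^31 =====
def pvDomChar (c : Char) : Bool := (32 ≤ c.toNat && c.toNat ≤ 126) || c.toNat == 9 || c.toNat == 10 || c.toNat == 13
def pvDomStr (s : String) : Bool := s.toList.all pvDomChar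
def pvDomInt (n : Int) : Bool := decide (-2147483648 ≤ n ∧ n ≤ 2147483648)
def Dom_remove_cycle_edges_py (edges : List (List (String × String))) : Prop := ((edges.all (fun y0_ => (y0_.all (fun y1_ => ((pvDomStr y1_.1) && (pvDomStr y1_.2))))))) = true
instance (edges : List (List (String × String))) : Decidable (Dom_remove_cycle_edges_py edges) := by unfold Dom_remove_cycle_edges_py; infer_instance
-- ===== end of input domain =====

-- B replaces A's explicit-stack DFS (suspended child iterators) by a recursive DFS visit;
-- equivalence of the RETURN value is proved on inputs whose edge dicts carry "from" and "to" keys.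

-- shared helpers (identical in both Pythons): e["key"] lookup and the adjacency build
def pvLookup (e : List (String × String)) (k : String) : String :=
  (((e.find? (fun p => p.1 == k)).map Prod.snd).getD "")

def pvAdj (edges : List (List (String × String))) : PySem.Dict String (List String) :=
  edges.foldl
    (fun d e => d.modify (pvLookup e "from") [] (fun l => l ++ [pvLookup e "to"]))
    PySem.Dict.empty

-- ===== PORT A =====
-- the while-stack loop of A; fuel (first Nat) only makes the recursion structural,
-- it is never exhausted on the fuel the port passes (2*|edges|+2 per start)
def pvLoopA (adj : PySem.Dict String (List String)) :
    Nat → List (String × List String) →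
    (PySem.Set String × PySem.Set String × PySem.Set (String × String)) →
    (PySem.Set String × PySem.Set String × PySem.Set (String × String))
  | _, [], st => st
  | 0, _ :: _, st => st
  | Nat.succ f, (node, cs) :: rest, (v, s, b) =>
    match cs with
    | [] => pvLoopA adj f rest (v, PySem.Set.discard s node, b)
    | c :: cs' =>
      if PySem.Set.contains s c then
        pvLoopA adj f ((node, cs') :: rest) (v, s, PySem.Set.add b (node, c))
      else if PySem.Set.contains v c then
        pvLoopA adj f ((node, cs') :: rest) (v, s, b)
      else
        pvLoopA adj f ((c, adj.getD c []) :: (node, cs') :: rest)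
          (PySem.Set.add v c, PySem.Set.add s c, b)

def remove_cycle_edges_py (edges : List (List (String × String))) : List (List (String × String)) :=
  let adj := pvAdj edges
  let fin := adj.keys.foldl
    (fun (st : PySem.Set String × PySem.Set String × PySem.Set (String × String)) start =>
      if PySem.Set.contains st.1 start then st
      else pvLoopA adj (2 * edges.length + 2) [(start, adj.getD start [])]
        (PySem.Set.add st.1 start, PySem.Set.add st.2.1 start, st.2.2))
    (PySem.Set.empty, PySem.Set.empty, PySem.Set.empty)
  edges.filter (fun e => !(PySem.Set.contains fin.2.2 (pvLookup e "from", pvLookup e "to")))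

-- ===== PORT B =====
-- the recursive visit of B; fuel is threaded through (consumed once per child step and
-- per return), again only a totality device — the `min` is a guard for termination only
mutual
def pvVisit (adj : PySem.Dict String (List String)) :
    Nat → String →
    (PySem.Set String × PySem.Set String × PySem.Set (String × String)) →
    (PySem.Set String × PySem.Set String × PySem.Set (String × String)) × Nat
  | 0, _, st => (st, 0)
  | Nat.succ f, n, (v, s, b) =>
    pvChildren adj f n (adj.getD n []) (PySem.Set.add v n, PySem.Set.add s n, b)
  termination_by f _ _ => 3 * f

def pvChildren (adj : PySem.Dict String (List String)) :
    Nat → String → List String →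
    (PySem.Set String × PySem.Set String × PySem.Set (String × String)) →
    (PySem.Set String × PySem.Set String × PySem.Set (String × String)) × Nat
  | 0, _, _, st => (st, 0)
  | Nat.succ f, n, [], (v, s, b) => ((v, PySem.Set.discard s n, b), f)
  | Nat.succ f, n, c :: cs, (v, s, b) =>
    if PySem.Set.contains s c then
      pvChildren adj f n cs (v, s, PySem.Set.add b (n, c))
    else if PySem.Set.contains v c then
      pvChildren adj f n cs (v, s, b)
    else
      let r := pvVisit adj (Nat.succ f) c (v, s, b)
      pvChildren adj (min r.2 f) n cs r.1
  termination_by f _ _ _ => 3 * f + 1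
end

def remove_cycle_edges_py_alt (edges : List (List (String × String))) : List (List (String × String)) :=
  let adj := pvAdj edges
  let fin := adj.keys.foldl
    (fun (st : PySem.Set String × PySem.Set String × PySem.Set (String × String)) start =>
      if PySem.Set.contains st.1 start then st
      else (pvVisit adj (2 * edges.length + 3) start st).1)
    (PySem.Set.empty, PySem.Set.empty, PySem.Set.empty)
  edges.filter (fun e => !(PySem.Set.contains fin.2.2 (pvLookup e "from", pvLookup e "to")))

-- ===== PRECONDITION & SPEC =====
-- A raises KeyError on any edge dict lacking a "from" or "to" key; exactly those are excluded.
def Pre_remove_cycle_edges_py (edges : List (List (String × String))) : Prop :=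
  ∀ e ∈ edges, "from" ∈ e.map Prod.fst ∧ "to" ∈ e.map Prod.fst
instance (edges : List (List (String × String))) : Decidable (Pre_remove_cycle_edges_py edges) := by unfold Pre_remove_cycle_edges_py; infer_instance

def pvWitness_remove_cycle_edges_py : (List (List (String × String))) :=
  [[("from", "a"), ("to", "b")], [("from", "b"), ("to", "a")]]

def Spec_remove_cycle_edges_py (edges : List (List (String × String))) (out : List (List (String × String))) : Prop := out = remove_cycle_edges_py_alt edges
instance (edges : List (List (String × String))) (out : List (List (String × String))) : Decidable (Spec_remove_cycle_edges_py edges out) := by unfold Spec_remove_cycle_edges_py; infer_instance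

-- ===== CLAIM (what is proved, stated in full; the proofs are below) =====
def Claim_equal_remove_cycle_edges_py : Prop := ∀ (edges : List (List (String × String))), Dom_remove_cycle_edges_py edges → Pre_remove_cycle_edges_py edges → Spec_remove_cycle_edges_py edges (remove_cycle_edges_py edges)

-- ===== LEMMAS AND PROOFS =====

theorem pvLoopA_zero (adj : PySem.Dict String (List String)) (stack : List (String × List String))
    (st : PySem.Set String × PySem.Set String × PySem.Set (String × String)) :
    pvLoopA adj 0 stack st = st := by
  cases stack <;> rfl

theorem pvLoopA_nil (adj : PySem.Dict String (List String)) (f : Nat)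
    (st : PySem.Set String × PySem.Set String × PySem.Set (String × String)) :
    pvLoopA adj f [] st = st := by
  cases f <;> rfl

theorem pvChildren_snd_le (adj : PySem.Dict String (List String)) :
    ∀ (f : Nat) (n : String) (cs : List String)
      (st : PySem.Set String × PySem.Set String × PySem.Set (String × String)),
      (pvChildren adj f n cs st).2 ≤ f := by
  intro f
  induction f using Nat.strong_induction_on with
  | _ f ih =>
    intro n cs st
    obtain ⟨v, s, b⟩ := st
    match f, cs with
    | 0, _ => simp [pvChildren]
    | Nat.succ f, [] => simp [pvChildren]
    | Nat.succ f, c :: cs' =>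
      simp only [pvChildren]
      split
      · exact le_trans (ih f (by omega) _ _ _) (by omega)
      · split
        · exact le_trans (ih f (by omega) _ _ _) (by omega)
        · exact le_trans (ih (min (pvVisit adj (f+1) c (v, s, b)).2 f) (by omega) _ _ _) (by omega)

-- the simulation: one suspended frame (n, cs) on A's stack behaves as B's child loop for n
theorem pvSim (adj : PySem.Dict String (List String)) :
    ∀ (f : Nat) (n : String) (cs : List String) (rest : List (String × List String))
      (st : PySem.Set String × PySem.Set String × PySem.Set (String × String)),
      pvLoopA adj f ((n, cs) :: rest) st =
        pvLoopA adj (pvChildren adj f n cs st).2 rest (pvChildren adj f n cs st).1 := by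
  intro f
  induction f using Nat.strong_induction_on with
  | _ f ih =>
    intro n cs rest st
    obtain ⟨v, s, b⟩ := st
    match f, cs with
    | 0, cs => simp [pvChildren, pvLoopA_zero]
    | Nat.succ f, [] => simp [pvChildren, pvLoopA]
    | Nat.succ f, c :: cs' =>
      simp only [pvChildren, pvLoopA]
      split
      · exact ih f (by omega) n cs' rest _
      · split
        · exact ih f (by omega) n cs' rest _
        · have hle : (pvVisit adj (f + 1) c (v, s, b)).2 ≤ f := by
            simp only [pvVisit]
            exact pvChildren_snd_le adj f c _ _
          rw [ih f (by omega) c (adj.getD c []) ((n, cs') :: rest) _]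
          have hv : pvChildren adj f c (adj.getD c [])
              (PySem.Set.add v c, PySem.Set.add s c, b) = pvVisit adj (f + 1) c (v, s, b) := by
            simp [pvVisit]
          rw [hv]
          rw [ih (pvVisit adj (f + 1) c (v, s, b)).2 (by omega) n cs' rest _]
          rw [min_eq_left hle]

theorem pvStep (adj : PySem.Dict String (List String)) (F : Nat) (start : String)
    (st : PySem.Set String × PySem.Set String × PySem.Set (String × String)) :
    pvLoopA adj F [(start, adj.getD start [])]
        (PySem.Set.add st.1 start, PySem.Set.add st.2.1 start, st.2.2)
      = (pvVisit adj (F + 1) start st).1 := by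
  obtain ⟨v, s, b⟩ := st
  rw [pvSim, pvLoopA_nil]
  simp [pvVisit]

-- ===== VERDICT (by name: the statement is the Claim_ definition above) =====
theorem remove_cycle_edges_py_spec : Claim_equal_remove_cycle_edges_py := by
  intro edges _ _
  unfold Spec_remove_cycle_edges_py remove_cycle_edges_py remove_cycle_edges_py_alt
  have hfold :
      (pvAdj edges).keys.foldl
        (fun (st : PySem.Set String × PySem.Set String × PySem.Set (String × String)) start =>
          if PySem.Set.contains st.1 start then st
          else pvLoopA (pvAdj edges) (2 * edges.length + 2) [(start, (pvAdj edges).getD start [])]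
            (PySem.Set.add st.1 start, PySem.Set.add st.2.1 start, st.2.2))
        (PySem.Set.empty, PySem.Set.empty, PySem.Set.empty)
      = (pvAdj edges).keys.foldl
        (fun (st : PySem.Set String × PySem.Set String × PySem.Set (String × String)) start =>
          if PySem.Set.contains st.1 start then st
          else (pvVisit (pvAdj edges) (2 * edges.length + 3) start st).1)
        (PySem.Set.empty, PySem.Set.empty, PySem.Set.empty) := by
    apply PySem.List.foldl_congr_mem
    intro st start _
    split
    next => rfl
    next =>
      exact pvStep (pvAdj edges) (2 * edges.length + 2) start st
  simp only []
  rw [hfold]
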